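-- pv_equiv track=rewrite | github.com/briefausde/numbers-to-words | humanize.py | humanize
-- ===== SOURCE A (Python) =====
-- ERROR_STRING = 'invalid input'
--
-- NUMBERS = {
--     1: 'one', 2: 'two', 3: 'three', 4: 'four', 5: 'five', 6: 'six', 7: 'seven', 8: 'eight', 9: 'nine',
--     10: 'ten', 11: 'eleven', 12: 'twelve', 13: 'thirteen', 14: 'fourteen', 15: 'fifteen', 16: 'sixteen',
--     17: 'seventeen', 18: 'eighteen', 19: 'nineteen', 20: 'twenty', 30: 'thirty', 40: 'forty', 50: 'fifty',
--     60: 'sixty', 70: 'seventy', 80: 'eighty', 90: 'ninety'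
-- }
--
-- THOUSANDS = {
--     1: 'thousand', 2: 'million', 3: 'billion', 4: 'trillion'
-- }
--
-- OPERATIONS = {
--     '+': 'plus', '-': 'minus', '*': 'multiplication', '/': 'division', '=': 'equals'
-- }
--
-- def convert(s):
--     result = list()
--
--     def _n2w(number):
--         try:
--             return NUMBERS[number]
--         except KeyError:
--             if number < 100:
--                 return '{} {}'.format(NUMBERS[number - number % 10], NUMBERS[number % 10])
--             if number % 100:
--                 return '{} hundred {}'.format(NUMBERS[number // 100], _n2w(number % 100))
--             return '{} hundred'.format(NUMBERS[number // 100])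
--
--     if s == '0':
--         return 'zero'
--
--     if len(s) > 15:
--         return ERROR_STRING
--
--     iterations = len(s) // 3  # calculate the number of triples in string
--     if len(s) % 3:
--         iterations += 1
--
--     for i in range(0, iterations):
--         symbols = int(s[(i+1)*-3:i*-3 if i else None])  # slice three symbols one by one
--         if symbols:
--             if i:  # when i equals zero, we process the last three characters i.e not thousands
--                 result.append(THOUSANDS[i])
--             result.append(_n2w(symbols))
--
--     return ' '.join(result[::-1])
--
-- def humanize(s):
--     tokens = list()
--
--     number = ''
--     operations_nearby_flag = True
--
--     for symbol in s:
--         if symbol.isdigit():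
--             number += symbol
--         elif number:
--             tokens.append(convert(number))
--             number = ''
--             operations_nearby_flag = False
--
--         if not symbol.isdigit():
--             if symbol in OPERATIONS:
--                 if operations_nearby_flag:
--                     return ERROR_STRING
--
--                 tokens.append(OPERATIONS[symbol])
--                 operations_nearby_flag = True
--
--             elif symbol != ' ':
--                 return ERROR_STRING
--
--     if number:
--         tokens.append(convert(number))
--
--     return ' '.join(tokens)
-- ===== SOURCE B (Python) =====
-- ERROR_STRING = 'invalid input'
--
-- ONES = ['', 'one', 'two', 'three', 'four', 'five', 'six', 'seven', 'eight', 'nine',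
--         'ten', 'eleven', 'twelve', 'thirteen', 'fourteen', 'fifteen', 'sixteen',
--         'seventeen', 'eighteen', 'nineteen']
--
-- TENS = ['', '', 'twenty', 'thirty', 'forty', 'fifty', 'sixty', 'seventy', 'eighty', 'ninety']
--
-- SCALES = ['', 'thousand', 'million', 'billion', 'trillion']
--
-- OPS = {'+': 'plus', '-': 'minus', '*': 'multiplication', '/': 'division', '=': 'equals'}
--
--
-- def _small(n):
--     # 1 <= n <= 999, via list indexing instead of a dict with recursion
--     parts = []
--     if n >= 100:
--         parts.append(ONES[n // 100] + ' hundred')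
--         n %= 100
--     if n >= 20:
--         parts.append(TENS[n // 10] + (' ' + ONES[n % 10] if n % 10 else ''))
--     elif n:
--         parts.append(ONES[n])
--     return ' '.join(parts)
--
--
-- def _num_words(s):
--     # consume the digit string three characters at a time from the right
--     if s == '0':
--         return 'zero'
--     if len(s) > 15:
--         return ERROR_STRING
--     pieces = []
--     scale = 0
--     while s:
--         grp = int(s[-3:])
--         if grp:
--             word = _small(grp)
--             if scale:
--                 word += ' ' + SCALES[scale]
--             pieces.append(word)
--         s = s[:-3]
--         scale += 1
--     return ' '.join(reversed(pieces))
--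
--
-- def humanize(s):
--     # phase 1: tokenize into (is_number, word) pairs; spaces vanish, anything
--     # other than digits/operators/spaces is invalid
--     tokens = []
--     i, n = 0, len(s)
--     while i < n:
--         c = s[i]
--         if c.isdigit():
--             j = i
--             while j < n and s[j].isdigit():
--                 j += 1
--             tokens.append((True, _num_words(s[i:j])))
--             i = j
--         elif c in OPS:
--             tokens.append((False, OPS[c]))
--             i += 1
--         elif c == ' ':
--             i += 1
--         else:
--             return ERROR_STRING
--     # phase 2: an operator is only allowed directly after a number token
--     words = []
--     prev_was_number = False
--     for is_num, word in tokens: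
--         if not is_num and not prev_was_number:
--             return ERROR_STRING
--         words.append(word)
--         prev_was_number = is_num
--     return ' '.join(words)
-- ===== Notes on version B (the rewrite author's own statement) =====
-- stated objective: alternative
-- what changed: humanize is split into a tokenizer (whole digit runs and operator names, spaces dropped) followed by a validation pass over the tagged tokens instead of A's fused character loop with a number-accumulator string and an adjacency flag, and the number naming replaces A's dict-based recursive _n2w over string slices indexed by a range loop with list-indexed arithmetic naming (ONES/TENS/SCALES tables) of each 3-digit chunk consumed from the right of the digit string.
import Mathlib
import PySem

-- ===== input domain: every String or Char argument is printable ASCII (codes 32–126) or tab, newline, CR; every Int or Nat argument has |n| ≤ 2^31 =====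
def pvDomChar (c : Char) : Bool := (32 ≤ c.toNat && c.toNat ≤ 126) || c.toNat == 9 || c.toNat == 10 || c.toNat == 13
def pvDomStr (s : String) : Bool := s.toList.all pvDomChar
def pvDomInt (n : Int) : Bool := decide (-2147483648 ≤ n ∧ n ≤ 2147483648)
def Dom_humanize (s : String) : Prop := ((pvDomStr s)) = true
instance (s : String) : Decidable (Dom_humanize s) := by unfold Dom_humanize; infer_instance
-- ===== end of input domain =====

-- B (alternative): replaces A's dict-driven recursive number naming and fused single-pass
-- scanner by list-indexed arithmetic naming of each 3-digit chunk consumed from the right,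
-- and a tokenize-then-validate pipeline for the expression.

-- ===== PORT A =====
def ERROR_STRING : String := "invalid input"

def NUMBERS : PySem.Dict Int String := PySem.Dict.ofList
  [(1,"one"),(2,"two"),(3,"three"),(4,"four"),(5,"five"),(6,"six"),(7,"seven"),(8,"eight"),(9,"nine"),
   (10,"ten"),(11,"eleven"),(12,"twelve"),(13,"thirteen"),(14,"fourteen"),(15,"fifteen"),(16,"sixteen"),
   (17,"seventeen"),(18,"eighteen"),(19,"nineteen"),(20,"twenty"),(30,"thirty"),(40,"forty"),(50,"fifty"),
   (60,"sixty"),(70,"seventy"),(80,"eighty"),(90,"ninety")]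

def THOUSANDS : PySem.Dict Int String := PySem.Dict.ofList
  [(1,"thousand"),(2,"million"),(3,"billion"),(4,"trillion")]

def OPERATIONS : PySem.Dict Char String := PySem.Dict.ofList
  [('+',"plus"),('-',"minus"),('*',"multiplication"),('/',"division"),('=',"equals")]

-- _n2w; the KeyError fallbacks on NUMBERS lookups inside the except-branches are unreachable
-- for every call convert makes (numbers are 1..999 there), so getD "" is used for totality.
def n2w (number : Int) : String :=
  match NUMBERS.get? number with
  | some w => w
  | none =>
    if number < 100 then
      NUMBERS.getD (number - PySem.Int.mod number 10) "" ++ " " ++ NUMBERS.getD (PySem.Int.mod number 10) ""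
    else if PySem.Int.mod number 100 ≠ 0 then
      NUMBERS.getD (PySem.Int.floordiv number 100) "" ++ " hundred " ++ n2w (PySem.Int.mod number 100)
    else
      NUMBERS.getD (PySem.Int.floordiv number 100) "" ++ " hundred"
termination_by number.toNat
decreasing_by
  have h1 : 0 ≤ PySem.Int.mod number 100 := PySem.Int.mod_nonneg number (by omega)
  have h2 : PySem.Int.mod number 100 < 100 := PySem.Int.mod_lt number (by omega)
  omega

-- convert, on the code points of its argument; int() on a slice of a digit run cannot fail
-- and THOUSANDS[i] with i ≤ 4 cannot fail, so getD is used for totality.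
def convert (s : List Char) : String :=
  if s = ['0'] then "zero"
  else if 15 < s.length then ERROR_STRING
  else
    let lenI : Int := (s.length : Int)
    let iterations : Int :=
      PySem.Int.floordiv lenI 3 + (if PySem.Int.mod lenI 3 ≠ 0 then 1 else 0)
    let result : List String :=
      (PySem.List.pyRange 0 iterations 1).foldl (fun result i =>
        let symbols : Int :=
          (PySem.Int.ofChars? (PySem.List.slice s (some ((i+1)*(-3)))
              (if i ≠ 0 then some (i*(-3)) else none))).getD 0
        if symbols ≠ 0 then
          (if i ≠ 0 then result ++ [THOUSANDS.getD i ""] else result) ++ [n2w symbols]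
        else result) []
    PySem.Str.join " " result.reverse   -- ' '.join(result[::-1])

-- the for-loop of A's humanize: state (tokens, number, operations_nearby_flag); none = early ERROR return
def aLoop : List Char → List String → List Char → Bool → Option (List String)
  | [], tokens, number, _ =>
      some (if number.isEmpty then tokens else tokens ++ [convert number])  -- final 'if number' flush
  | c :: rest, tokens, number, flag =>
      if PySem.Chars.isdigit c then aLoop rest tokens (number ++ [c]) flag
      else
        -- 'elif number:' flush
        let st := if number.isEmpty then (tokens, flag) else (tokens ++ [convert number], false)
        match OPERATIONS.get? c with
        | some w => if st.2 then none else aLoop rest (st.1 ++ [w]) [] true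
        | none => if c = ' ' then aLoop rest st.1 [] st.2 else none

def humanize (s : String) : String :=
  match aLoop s.toList [] [] true with
  | none => ERROR_STRING
  | some tokens => PySem.Str.join " " tokens

-- ===== PORT B =====
def ERRB : String := "invalid input"

def ONES : List String :=
  ["", "one", "two", "three", "four", "five", "six", "seven", "eight", "nine",
   "ten", "eleven", "twelve", "thirteen", "fourteen", "fifteen", "sixteen",
   "seventeen", "eighteen", "nineteen"]

def TENS : List String :=
  ["", "", "twenty", "thirty", "forty", "fifty", "sixty", "seventy", "eighty", "ninety"]

def SCALES : List String := ["", "thousand", "million", "billion", "trillion"]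

-- Source B's _small: 1 <= n <= 999; every list index taken is in range there, so getD "" is used
def smallB (n : Int) : String :=
  let p1 : List String :=
    if 100 ≤ n then [ONES.getD (PySem.Int.floordiv n 100).toNat "" ++ " hundred"] else []
  let m : Int := if 100 ≤ n then PySem.Int.mod n 100 else n
  let p2 : List String :=
    if 20 ≤ m then
      p1 ++ [TENS.getD (PySem.Int.floordiv m 10).toNat "" ++
        (if PySem.Int.mod m 10 ≠ 0 then " " ++ ONES.getD (PySem.Int.mod m 10).toNat "" else "")]
    else if m ≠ 0 then p1 ++ [ONES.getD m.toNat ""] else p1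
  PySem.Str.join " " p2

-- Source B's while-loop in _num_words: s is always a (possibly empty) digit string, so `while s`
-- tests emptiness and int(s[-3:]) cannot fail (getD 0 for totality)
def chunkLoop (u : List Char) (scale : Nat) (pieces : List String) : List String :=
  if u = [] then pieces
  else
    let grp : Int := (PySem.Int.ofChars? (PySem.List.slice u (some (-3)) none)).getD 0
    let pieces' := if grp ≠ 0 then
        pieces ++ [smallB grp ++ (if scale ≠ 0 then " " ++ SCALES.getD scale "" else "")]
      else pieces
    chunkLoop (PySem.List.slice u none (some (-3))) (scale + 1) pieces'
termination_by u.length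
decreasing_by
  rw [PySem.List.slice_to_neg_ofNat u 3 (by norm_num)]
  have : u ≠ [] := by assumption
  have h0 : 0 < u.length := List.length_pos_iff.mpr this
  simp [List.length_take]
  omega

def numWords (s : List Char) : String :=
  if s = ['0'] then "zero"
  else if 15 < s.length then ERRB
  else PySem.Str.join " " (chunkLoop s 0 []).reverse   -- ' '.join(reversed(pieces))

-- Source B's OPS, a fixed literal dict only ever read by lookup: ported as a case match (exact)
def opName (c : Char) : Option String :=
  match c with
  | '+' => some "plus"
  | '-' => some "minus"
  | '*' => some "multiplication"
  | '/' => some "division"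
  | '=' => some "equals"
  | _ => none

-- phase 1 of Source B: the outer while with an inner digit-run while = takeWhile/dropWhile
def tokB : List Char → Option (List (Bool × String))
  | [] => some []
  | c :: rest =>
      if PySem.Chars.isdigit c then
        (tokB (rest.dropWhile PySem.Chars.isdigit)).map
          (fun ts => (true, numWords (c :: rest.takeWhile PySem.Chars.isdigit)) :: ts)
      else
        match opName c with
        | some w => (tokB rest).map (fun ts => (false, w) :: ts)
        | none => if c = ' ' then tokB rest else none
termination_by cs => cs.length
decreasing_by
  all_goals simp [Nat.lt_succ_of_le (List.length_dropWhile_le _ _)]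

-- phase 2 of Source B: an operator is only allowed directly after a number token
def bPass2 : List (Bool × String) → List String → Bool → Option (List String)
  | [], words, _ => some words
  | (isNum, w) :: rest, words, prev =>
      if !isNum && !prev then none
      else bPass2 rest (words ++ [w]) isNum

def humanize_alt (s : String) : String :=
  match tokB s.toList with
  | none => ERRB
  | some toks =>
    match bPass2 toks [] false with
    | none => ERRB
    | some words => PySem.Str.join " " words

-- ===== PRECONDITION & SPEC =====
def Spec_humanize (s : String) (out : String) : Prop := out = humanize_alt s
instance (s : String) (out : String) : Decidable (Spec_humanize s out) := by unfold Spec_humanize; infer_instance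

-- ===== CLAIM (what is proved, stated in full; the proofs are below) =====
def Claim_equal_humanize : Prop := ∀ (s : String), Dom_humanize s → Spec_humanize s (humanize s)

-- ===== LEMMAS AND PROOFS =====

-- ---------- joining phrases ----------

theorem join_singleton (a : String) : PySem.Str.join " " [a] = a := by
  apply String.toList_inj.mp
  simp [PySem.Str.join, PySem.Chars.join, List.intercalate]

theorem join_cons_ne (a : String) (r : List String) (hr : r ≠ []) :
    PySem.Str.join " " (a :: r) = a ++ " " ++ PySem.Str.join " " r := by
  apply String.toList_inj.mp
  cases r with
  | nil => simp at hr
  | cons b t => simp [PySem.Str.join, PySem.Chars.join, List.intercalate]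

theorem join_pair (a b : String) : PySem.Str.join " " [a, b] = a ++ " " ++ b := by
  apply String.toList_inj.mp
  simp [PySem.Str.join, PySem.Chars.join, List.intercalate]

theorem join_append_ne (a b : List String) (ha : a ≠ []) (hb : b ≠ []) :
    PySem.Str.join " " (a ++ b) = PySem.Str.join " " a ++ " " ++ PySem.Str.join " " b := by
  induction a with
  | nil => simp at ha
  | cons x t ih =>
    cases t with
    | nil => simp [join_cons_ne x b hb, join_singleton]
    | cons y u =>
      rw [List.cons_append, join_cons_ne x ((y :: u) ++ b) (by simp),
          join_cons_ne x (y :: u) (by simp), ih (by simp)]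
      simp [String.append_assoc]

-- ---------- the two small-number namers agree on 1..999 ----------

theorem numbers_get?_big (g : Int) (hg : 100 ≤ g) : NUMBERS.get? g = none := by
  cases hq : NUMBERS.get? g with
  | none => rfl
  | some w =>
    exfalso
    have hmem := PySem.Dict.mem_items_of_get?_eq_some NUMBERS hq
    have hk := PySem.Dict.mem_keys_of_mem_items NUMBERS hmem
    have hkeys : NUMBERS.keys = [1,2,3,4,5,6,7,8,9,10,11,12,13,14,15,16,17,18,19,20,30,40,50,60,70,80,90] := by decide
    rw [hkeys] at hk
    simp at hk
    omega

theorem n2w_eq_smallB_two_digit (r : Int) (h1 : 1 ≤ r) (h2 : r ≤ 99) : n2w r = smallB r := by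
  interval_cases r <;> (rw [n2w.eq_def]; decide)

theorem n2w_eq_smallB_hundreds (h : Int) (h1 : 1 ≤ h) (h2 : h ≤ 9) :
    n2w (100 * h) = smallB (100 * h) := by
  interval_cases h <;> (rw [n2w.eq_def]; decide)

theorem numbers_ones (h : Int) (h1 : 1 ≤ h) (h2 : h ≤ 9) :
    NUMBERS.getD h "" = ONES.getD h.toNat "" := by
  interval_cases h <;> decide

theorem smallB_split (h r : Int) (hh1 : 1 ≤ h) (hh2 : h ≤ 9) (hr1 : 1 ≤ r) (hr2 : r ≤ 99) :
    smallB (100 * h + r) = ONES.getD h.toNat "" ++ " hundred " ++ smallB r := by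
  have hq : PySem.Int.floordiv (100 * h + r) 100 = h := by
    rw [PySem.Int.floordiv_eq_iff_of_pos (by omega)]; omega
  have hfd := PySem.Int.floordiv_mul_add_mod (100 * h + r) 100
  have hm : PySem.Int.mod (100 * h + r) 100 = r := by omega
  have hcat : (" hundred " : String) = " hundred" ++ " " := by decide
  simp only [smallB, hq, hm, if_pos (show (100:Int) ≤ 100 * h + r by omega),
    if_neg (show ¬ (100:Int) ≤ r by omega)]
  split_ifs with h20 hne hr0
  all_goals try (exfalso; omega)
  all_goals
    rw [List.singleton_append, List.nil_append, join_pair, join_singleton, hcat]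
  all_goals simp [String.append_assoc]

theorem n2w_eq_smallB (g : Int) (h1 : 1 ≤ g) (h2 : g ≤ 999) : n2w g = smallB g := by
  by_cases hlt : g ≤ 99
  · exact n2w_eq_smallB_two_digit g h1 hlt
  · have hge : 100 ≤ g := by omega
    have hfd : PySem.Int.floordiv g 100 * 100 + PySem.Int.mod g 100 = g :=
      PySem.Int.floordiv_mul_add_mod g 100
    have hm0 : 0 ≤ PySem.Int.mod g 100 := PySem.Int.mod_nonneg g (by omega)
    have hm99 : PySem.Int.mod g 100 < 100 := PySem.Int.mod_lt g (by omega)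
    have hh1 : 1 ≤ PySem.Int.floordiv g 100 := by nlinarith [hfd]
    have hh9 : PySem.Int.floordiv g 100 ≤ 9 := by nlinarith [hfd]
    by_cases hr0 : PySem.Int.mod g 100 = 0
    · have : g = 100 * PySem.Int.floordiv g 100 := by omega
      rw [this]; exact n2w_eq_smallB_hundreds _ hh1 hh9
    · rw [n2w.eq_def, numbers_get?_big g hge]
      simp only
      rw [if_neg (by omega), if_pos hr0]
      rw [n2w_eq_smallB_two_digit _ (by omega) (by omega),
          numbers_ones _ hh1 hh9]
      have hgeq : g = 100 * PySem.Int.floordiv g 100 + PySem.Int.mod g 100 := by omega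
      calc ONES.getD (PySem.Int.floordiv g 100).toNat "" ++ " hundred " ++ smallB (PySem.Int.mod g 100)
          = smallB (100 * PySem.Int.floordiv g 100 + PySem.Int.mod g 100) :=
            (smallB_split _ _ hh1 hh9 (by omega) (by omega)).symm
        _ = smallB g := by rw [← hgeq]

-- ---------- groups of three digits, counted from the right ----------

-- the k-th group of three characters from the right (proof-side notation)
def gp (t : List Char) (k : Nat) : List Char :=
  (t.drop (t.length - 3*k - 3)).take ((t.length - 3*k) - (t.length - 3*k - 3))

def gv (t : List Char) (k : Nat) : Int := (PySem.Int.ofChars? (gp t k)).getD 0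

-- what A's loop appends for index k (in loop order)
def hA (t : List Char) (k : Nat) : List String :=
  if gv t k = 0 then []
  else (if k ≠ 0 then [THOUSANDS.getD (k : Int) ""] else []) ++ [n2w (gv t k)]

-- what B's loop appends for index k
def hB (t : List Char) (k : Nat) : List String :=
  if gv t k = 0 then []
  else [smallB (gv t k) ++ (if k ≠ 0 then " " ++ SCALES.getD k "" else "")]

theorem sliceA_eq_gp (t : List Char) (k : Nat) :
    PySem.List.slice t (some (((k : Int) + 1)*(-3)))
      (if (k : Int) ≠ 0 then some ((k : Int)*(-3)) else none) = gp t k := by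
  cases k with
  | zero =>
    rw [if_neg (by simp)]
    rw [show (((0:Nat) : Int) + 1)*(-3) = -3 by norm_num]
    rw [PySem.List.slice_from_neg_ofNat t 3 (by norm_num)]
    unfold gp
    simp only [Nat.mul_zero, Nat.sub_zero]
    rw [List.take_of_length_le (by rw [List.length_drop])]
  | succ k =>
    rw [if_pos (by omega)]
    rw [show (((k+1:Nat) : Int) + 1)*(-3) = -((3*k+6 : Nat) : Int) by push_cast; ring]
    rw [show ((k+1:Nat) : Int)*(-3) = -((3*k+3 : Nat) : Int) by push_cast; ring]
    simp only [PySem.List.slice, PySem.List.clampIdx_neg_natCast _ _ (by omega : 0 < 3*k+6),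
      PySem.List.clampIdx_neg_natCast _ _ (by omega : 0 < 3*k+3)]
    unfold gp
    congr 1

-- A's foldl over range(iterations) appends exactly the hA blocks
theorem foldlA_eq (t : List Char) (l : List Nat) (acc : List String) :
    l.foldl (fun (result : List String) (k : Nat) =>
      (fun (result : List String) (i : Int) =>
        let symbols : Int :=
          (PySem.Int.ofChars? (PySem.List.slice t (some ((i+1)*(-3)))
              (if i ≠ 0 then some (i*(-3)) else none))).getD 0
        if symbols ≠ 0 then
          (if i ≠ 0 then result ++ [THOUSANDS.getD i ""] else result) ++ [n2w symbols]
        else result) result (k : Int)) acc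
    = acc ++ l.flatMap (hA t) := by
  induction l generalizing acc with
  | nil => simp
  | cons k l ih =>
    simp only [List.foldl_cons, List.flatMap_cons]
    rw [ih, ← List.append_assoc]
    congr 1
    simp only [sliceA_eq_gp t k]
    unfold hA gv
    split_ifs <;> simp_all [Int.natCast_eq_zero]

theorem convertA_eq (t : List Char) (h0 : t ≠ ['0']) (h15 : ¬ 15 < t.length) :
    convert t =
      PySem.Str.join " " (((List.range ((t.length + 2)/3)).flatMap (hA t)).reverse) := by
  have hiter : PySem.Int.floordiv ((t.length : Int)) 3 +
      (if PySem.Int.mod ((t.length : Int)) 3 ≠ 0 then 1 else 0) = (((t.length + 2)/3 : Nat) : Int) := by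
    have hfd : PySem.Int.floordiv ((t.length : Int)) 3 = ((t.length / 3 : Nat) : Int) := by
      exact_mod_cast PySem.Int.floordiv_natCast t.length 3
    have hmd : PySem.Int.mod ((t.length : Int)) 3 = ((t.length % 3 : Nat) : Int) := by
      exact_mod_cast PySem.Int.mod_natCast t.length 3
    rw [hfd, hmd]
    split_ifs with hm
    · have h3 : t.length % 3 ≠ 0 := by exact_mod_cast hm
      push_cast
      omega
    · have h3 : t.length % 3 = 0 := by
        by_contra h
        exact hm (by exact_mod_cast h)
      push_cast
      omega
  simp only [convert, if_neg h0, if_neg h15]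
  rw [hiter, PySem.List.pyRange_zero_natCast, List.foldl_map, foldlA_eq t _ []]
  rw [List.nil_append]

-- ---------- B's chunk loop ----------

-- chunkLoop with the accumulator factored out (proof-side)
def LB (u : List Char) (scale : Nat) : List String :=
  if u = [] then []
  else
    (if (PySem.Int.ofChars? (PySem.List.slice u (some (-3)) none)).getD 0 ≠ 0 then
      [smallB ((PySem.Int.ofChars? (PySem.List.slice u (some (-3)) none)).getD 0) ++
        (if scale ≠ 0 then " " ++ SCALES.getD scale "" else "")]
    else []) ++ LB (PySem.List.slice u none (some (-3))) (scale + 1)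
termination_by u.length
decreasing_by
  rw [PySem.List.slice_to_neg_ofNat u 3 (by norm_num)]
  have : u ≠ [] := by assumption
  have h0 : 0 < u.length := List.length_pos_iff.mpr this
  simp [List.length_take]
  omega

theorem chunkLoop_acc : ∀ (m : Nat) (u : List Char), u.length ≤ m → ∀ (k : Nat) (ps : List String),
    chunkLoop u k ps = ps ++ LB u k := by
  intro m
  induction m with
  | zero =>
    intro u hu k ps
    have : u = [] := List.length_eq_zero_iff.mp (Nat.le_zero.mp hu)
    subst this
    rw [chunkLoop, LB]
    simp
  | succ m ih =>
    intro u hu k ps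
    by_cases hne : u = []
    · subst hne; rw [chunkLoop, LB]; simp
    · rw [chunkLoop, LB, if_neg hne, if_neg hne]
      have hlen : (PySem.List.slice u none (some (-3))).length ≤ m := by
        rw [PySem.List.slice_to_neg_ofNat u 3 (by norm_num)]
        have h0 : 0 < u.length := List.length_pos_iff.mpr hne
        simp [List.length_take]
        omega
      rw [ih _ hlen]
      by_cases hg : (PySem.Int.ofChars? (PySem.List.slice u (some (-3)) none)).getD 0 ≠ 0
      · rw [if_pos hg, if_pos hg, List.append_assoc]
      · rw [if_neg hg, if_neg hg, List.nil_append]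

theorem LB_take (t : List Char) :
    ∀ (d k : Nat), k + d = (t.length + 2)/3 →
    LB (t.take (t.length - 3*k)) k = (List.range' k d).flatMap (hB t) := by
  intro d
  induction d with
  | zero =>
    intro k hk
    have hz : t.length - 3*k = 0 := by omega
    rw [hz]
    rw [LB]
    simp
  | succ d ih =>
    intro k hk
    have h3k : 3*k < t.length := by omega
    have hne : t.take (t.length - 3*k) ≠ [] := by
      intro h
      have := congrArg List.length h
      simp [List.length_take] at this
      omega
    rw [LB, if_neg hne]
    have hchunk : PySem.List.slice (t.take (t.length - 3*k)) (some (-3)) none = gp t k := by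
      rw [PySem.List.slice_from_neg_ofNat _ 3 (by norm_num)]
      rw [List.length_take, Nat.min_eq_left (by omega), List.drop_take]
      rfl
    have hnext : PySem.List.slice (t.take (t.length - 3*k)) none (some (-3)) =
        t.take (t.length - 3*(k+1)) := by
      rw [PySem.List.slice_to_neg_ofNat _ 3 (by norm_num)]
      rw [List.length_take, Nat.min_eq_left (by omega), List.take_take,
          Nat.min_eq_left (by omega)]
      congr 1
    rw [hchunk, hnext, ih (k+1) (by omega)]
    rw [List.range'_succ, List.flatMap_cons]
    congr 1
    unfold hB gv
    by_cases hg : (PySem.Int.ofChars? (gp t k)).getD 0 = 0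
    · simp [hg]
    · simp [hg]

theorem numWordsB_eq (t : List Char) (h0 : t ≠ ['0']) (h15 : ¬ 15 < t.length) :
    numWords t =
      PySem.Str.join " " (((List.range' 0 ((t.length + 2)/3)).flatMap (hB t)).reverse) := by
  simp only [numWords, if_neg h0, if_neg h15]
  have h := chunkLoop_acc t.length t le_rfl 0 []
  rw [List.nil_append] at h
  rw [h]
  have := LB_take t ((t.length + 2)/3) 0 (by omega)
  rw [show t.length - 3*0 = t.length by omega, List.take_length] at this
  rw [this]

-- ---------- the digit groups are numbers 0..999 ----------

theorem digit_char (c : Char) (h : PySem.Chars.isdigit c = true) :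
    ∃ d : Fin 10, c = Char.ofNat (48 + (d : Nat)) := by
  simp only [PySem.Chars.isdigit, Bool.and_eq_true, decide_eq_true_eq] at h
  have h1 : 48 ≤ c.toNat ∧ c.toNat ≤ 57 := by
    obtain ⟨ha, hb⟩ := h
    constructor
    · exact ha
    · exact hb
  refine ⟨⟨c.toNat - 48, by omega⟩, ?_⟩
  conv_lhs => rw [← Char.ofNat_toNat c]
  congr 1
  simp
  omega

set_option maxRecDepth 8000 in
theorem ofChars_small (l : List Char) (hd : ∀ c ∈ l, PySem.Chars.isdigit c = true)
    (hl : l.length ≤ 3) :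
    0 ≤ (PySem.Int.ofChars? l).getD 0 ∧ (PySem.Int.ofChars? l).getD 0 < 1000 := by
  match l, hl with
  | [], _ => decide
  | [a], _ =>
    obtain ⟨d, rfl⟩ := digit_char a (hd a (by simp))
    clear hd
    revert d; decide
  | [a, b], _ =>
    obtain ⟨d1, rfl⟩ := digit_char a (hd a (by simp))
    obtain ⟨d2, rfl⟩ := digit_char b (hd b (by simp))
    clear hd
    revert d1 d2; decide
  | [a, b, c], _ =>
    obtain ⟨d1, rfl⟩ := digit_char a (hd a (by simp))
    obtain ⟨d2, rfl⟩ := digit_char b (hd b (by simp))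
    obtain ⟨d3, rfl⟩ := digit_char c (hd c (by simp))
    clear hd
    revert d1 d2 d3; decide

theorem gv_bounds (t : List Char) (hd : ∀ c ∈ t, PySem.Chars.isdigit c = true) (k : Nat) :
    0 ≤ gv t k ∧ gv t k < 1000 := by
  apply ofChars_small
  · intro c hc
    apply hd
    exact List.mem_of_mem_drop (List.mem_of_mem_take hc)
  · unfold gp
    rw [List.length_take]
    have := List.length_drop (l := t) (i := t.length - 3*k - 3)
    omega

-- ---------- per-index blocks agree up to joining ----------

theorem thousands_scales (k : Nat) (h1 : 1 ≤ k) (h4 : k ≤ 4) :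
    THOUSANDS.getD (k : Int) "" = SCALES.getD k "" := by
  interval_cases k <;> decide

theorem blocks_eq (t : List Char) (hd : ∀ c ∈ t, PySem.Chars.isdigit c = true) (k : Nat)
    (hk : k ≤ 4) :
    ((hA t k).reverse = [] ∧ (hB t k).reverse = []) ∨
    ((hA t k).reverse ≠ [] ∧ (hB t k).reverse ≠ [] ∧
      PySem.Str.join " " (hA t k).reverse = PySem.Str.join " " (hB t k).reverse) := by
  obtain ⟨hg0, hg1⟩ := gv_bounds t hd k
  by_cases hz : gv t k = 0
  · left; simp [hA, hB, hz]
  · right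
    have hn2w : n2w (gv t k) = smallB (gv t k) := n2w_eq_smallB _ (by omega) (by omega)
    by_cases hk0 : k = 0
    · subst hk0
      refine ⟨by simp [hA, hz], by simp [hB, hz], ?_⟩
      simp only [hA, hB, if_neg hz]
      simp only [ne_eq, not_true_eq_false, if_false, List.nil_append, List.reverse_cons,
        List.reverse_nil, List.nil_append]
      rw [join_singleton, join_singleton, hn2w]
      rw [String.append_empty]
    · refine ⟨by simp [hA, hz], by simp [hB, hz], ?_⟩
      simp only [hA, hB, if_neg hz, if_pos hk0]
      have h1 : 1 ≤ k := by omega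
      rw [show ([THOUSANDS.getD (k:Int) ""] ++ [n2w (gv t k)]).reverse
            = [n2w (gv t k), THOUSANDS.getD (k:Int) ""] from rfl]
      rw [show ([smallB (gv t k) ++ (" " ++ SCALES.getD k "")] : List String).reverse
            = [smallB (gv t k) ++ (" " ++ SCALES.getD k "")] from rfl]
      rw [join_pair, join_singleton, hn2w, thousands_scales k h1 hk]
      rw [String.append_assoc]

theorem join_flatMap_congr (f g : Nat → List String) :
    ∀ (L : List Nat), (∀ j ∈ L,
      (f j = [] ∧ g j = []) ∨ (f j ≠ [] ∧ g j ≠ [] ∧ PySem.Str.join " " (f j) = PySem.Str.join " " (g j))) →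
    PySem.Str.join " " (L.flatMap f) = PySem.Str.join " " (L.flatMap g) ∧
      (L.flatMap f = [] ↔ L.flatMap g = []) := by
  intro L
  induction L with
  | nil => intro _; simp
  | cons j L ih =>
    intro hL
    obtain ⟨ihj, ihe⟩ := ih (fun x hx => hL x (by simp [hx]))
    rcases hL j (by simp) with ⟨he1, he2⟩ | ⟨hn1, hn2, hj⟩
    · rw [List.flatMap_cons, List.flatMap_cons, he1, he2, List.nil_append, List.nil_append]
      exact ⟨ihj, ihe⟩
    · rw [List.flatMap_cons, List.flatMap_cons]
      by_cases hM : L.flatMap f = []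
      · have hMg : L.flatMap g = [] := ihe.mp hM
        rw [hM, hMg, List.append_nil, List.append_nil]
        exact ⟨hj, by simp [hn1, hn2]⟩
      · have hMg : L.flatMap g ≠ [] := fun h => hM (ihe.mpr h)
        rw [join_append_ne _ _ hn1 hM, join_append_ne _ _ hn2 hMg, hj, ihj]
        exact ⟨rfl, by simp [hn1, hn2]⟩

-- ---------- convert = numWords on digit runs ----------

theorem conv_full (t : List Char) (hne : t ≠ []) (hd : ∀ c ∈ t, PySem.Chars.isdigit c = true) :
    convert t = numWords t := by
  by_cases h0 : t = ['0']
  · subst h0; rfl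
  · by_cases h15 : 15 < t.length
    · simp only [convert, numWords, if_neg h0, if_pos h15]; rfl
    · rw [convertA_eq t h0 h15, numWordsB_eq t h0 h15, List.range_eq_range']
      rw [List.reverse_flatMap, List.reverse_flatMap]
      have hiter5 : (t.length + 2)/3 ≤ 5 := by omega
      refine (join_flatMap_congr (List.reverse ∘ hA t) (List.reverse ∘ hB t) _ ?_).1
      intro j hj
      have hjlt : j < (t.length + 2)/3 := by
        rw [List.mem_reverse, List.mem_range'] at hj
        omega
      have hb := blocks_eq t hd j (by omega)
      simpa using hb

-- ---------- the expression-level scan ----------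

theorem operations_get?_eq (c : Char) : OPERATIONS.get? c = opName c := by
  have hit : OPERATIONS.items =
      [('+',"plus"),('-',"minus"),('*',"multiplication"),('/',"division"),('=',"equals")] := by decide
  by_cases h1 : c = '+'
  · subst h1; decide
  by_cases h2 : c = '-'
  · subst h2; decide
  by_cases h3 : c = '*'
  · subst h3; decide
  by_cases h4 : c = '/'
  · subst h4; decide
  by_cases h5 : c = '='
  · subst h5; decide
  rw [show OPERATIONS.get? c
      = (OPERATIONS.items.find? (fun p => p.1 == c)).map (fun p => p.2) from rfl, hit]
  have b1 : ('+' == c) = false := by simp [Ne.symm h1]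
  have b2 : ('-' == c) = false := by simp [Ne.symm h2]
  have b3 : ('*' == c) = false := by simp [Ne.symm h3]
  have b4 : ('/' == c) = false := by simp [Ne.symm h4]
  have b5 : ('=' == c) = false := by simp [Ne.symm h5]
  simp [List.find?, opName, b1, b2, b3, b4, b5]

-- A's loop swallows a run of digits into the number accumulator
theorem aLoop_digits (ds : List Char) (hds : ∀ c ∈ ds, PySem.Chars.isdigit c = true) :
    ∀ (rest : List Char) (tokens : List String) (number : List Char) (flag : Bool),
    aLoop (ds ++ rest) tokens number flag = aLoop rest tokens (number ++ ds) flag := by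
  induction ds with
  | nil => intro rest tokens number flag; simp
  | cons d ds ih =>
      intro rest tokens number flag
      have hd : PySem.Chars.isdigit d = true := hds d (by simp)
      simp only [List.cons_append, aLoop, hd, if_pos]
      rw [ih (fun c hc => hds c (by simp [hc]))]
      simp

-- at a non-digit, flushing the pending number first does not change the loop's result
theorem aLoop_flush (c : Char) (rest : List Char) (tokens : List String) (number : List Char)
    (flag : Bool) (hc : PySem.Chars.isdigit c = false) (hn : ¬ number.isEmpty) :
    aLoop (c :: rest) tokens number flag
      = aLoop (c :: rest) (tokens ++ [convert number]) [] false := by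
  simp only [aLoop, hc, hn, List.isEmpty_nil, Bool.false_eq_true, if_pos]
  simp

-- a character the dropped run stops at is not a digit
theorem not_digit_head_drop (l : List Char) (d : Char) (t : List Char)
    (h : l.dropWhile PySem.Chars.isdigit = d :: t) : PySem.Chars.isdigit d = false := by
  have hne : l.dropWhile PySem.Chars.isdigit ≠ [] := by rw [h]; simp
  have h3 := List.head_dropWhile_not PySem.Chars.isdigit hne
  simp only [h] at h3
  simpa using h3

-- the main invariant: A's fused loop equals tokenize-then-validate, with
-- A's flag being the negation of B's prev_was_number
theorem aLoop_eq_tok : ∀ (n : Nat) (cs : List Char), cs.length ≤ n →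
    ∀ (tokens : List String) (flag : Bool),
    aLoop cs tokens [] flag = (tokB cs).bind (fun ts => bPass2 ts tokens (!flag)) := by
  intro n
  induction n with
  | zero =>
      intro cs h tokens flag
      have : cs = [] := List.length_eq_zero_iff.mp (Nat.le_zero.mp h)
      subst this
      simp [aLoop, tokB, bPass2]
  | succ n ih =>
      intro cs h tokens flag
      match cs with
      | [] => simp [aLoop, tokB, bPass2]
      | c :: rest =>
        simp only [List.length_cons, Nat.add_le_add_iff_right] at h
        by_cases hd : PySem.Chars.isdigit c = true
        · -- a digit starts a run
          have hallrun : ∀ x ∈ c :: rest.takeWhile PySem.Chars.isdigit,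
              PySem.Chars.isdigit x = true := by
            intro x hx
            rcases List.mem_cons.mp hx with h1 | h1
            · simpa [h1] using hd
            · exact List.mem_takeWhile_imp h1
          have hconv : convert (c :: rest.takeWhile PySem.Chars.isdigit)
              = numWords (c :: rest.takeWhile PySem.Chars.isdigit) :=
            conv_full _ (by simp) hallrun
          have habs : aLoop (c :: rest) tokens [] flag
              = aLoop (rest.dropWhile PySem.Chars.isdigit) tokens
                  (c :: rest.takeWhile PySem.Chars.isdigit) flag := by
            conv_lhs => rw [show c :: rest
              = (c :: rest.takeWhile PySem.Chars.isdigit)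
                  ++ rest.dropWhile PySem.Chars.isdigit by
                simp [List.takeWhile_append_dropWhile]]
            rw [aLoop_digits _ hallrun]
            simp
          have htok : tokB (c :: rest)
              = (tokB (rest.dropWhile PySem.Chars.isdigit)).map
                  (fun ts => (true, numWords (c :: rest.takeWhile PySem.Chars.isdigit)) :: ts) := by
            rw [tokB]
            simp [hd]
          have hlen' := List.length_dropWhile_le PySem.Chars.isdigit rest
          cases hre : rest.dropWhile PySem.Chars.isdigit with
          | nil =>
              rw [habs, hre, htok, hre]
              rw [show tokB [] = some [] from by rw [tokB]]
              simp [aLoop, bPass2, hconv]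
          | cons d t =>
              have hdnd : PySem.Chars.isdigit d = false := not_digit_head_drop rest d t hre
              rw [habs, hre,
                aLoop_flush d t tokens _ flag hdnd (by simp),
                ih (d :: t) (by rw [hre] at hlen'; simpa using Nat.le_trans hlen' h)
                  (tokens ++ [convert (c :: rest.takeWhile PySem.Chars.isdigit)]) false,
                htok, hre]
              cases tokB (d :: t) <;> simp [bPass2, hconv]
        · -- non-digit
          have hd' : PySem.Chars.isdigit c = false := by simpa using hd
          rw [tokB]
          simp only [hd', Bool.false_eq_true, if_false]
          rw [← operations_get?_eq c]
          match hop : OPERATIONS.get? c with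
          | some w =>
              simp only [aLoop, hd', hop, List.isEmpty_nil, Bool.false_eq_true, if_false, if_true]
              by_cases hf : flag
              · subst hf
                cases tokB rest <;> simp [bPass2]
              · have hf' : flag = false := by simpa using hf
                subst hf'
                rw [ih rest h (tokens ++ [w]) true]
                cases tokB rest <;> simp [bPass2]
          | none =>
              by_cases hsp : c = ' '
              · subst hsp
                simp only [aLoop, hd', hop, List.isEmpty_nil, Bool.false_eq_true, if_false,
                  if_true]
                exact ih rest h tokens flag
              · simp only [aLoop, hd', hop, List.isEmpty_nil, Bool.false_eq_true, if_false,
                  if_neg hsp, if_true]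
                simp

-- ===== VERDICT (by name: the statement is the Claim_ definition above) =====
theorem humanize_spec : Claim_equal_humanize := by
  intro s _
  unfold Spec_humanize humanize humanize_alt
  rw [aLoop_eq_tok s.toList.length s.toList le_rfl [] true]
  cases htk : tokB s.toList with
  | none => simp [ERROR_STRING, ERRB]
  | some ts => cases hbp : bPass2 ts [] false <;> simp [hbp, ERROR_STRING, ERRB]
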